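-- pv_equiv track=rewrite | github.com/olliemath/AdventOfCode | 2021/python/day_22/solution.py | compute
-- ===== SOURCE A (Python) =====
-- def compute(input, lim=50):
--     on = set()
--
--     for state, xx, yy, zz in input:
--         for x in range(max(xx[0], -lim), min(xx[1], lim) + 1):
--             for y in range(max(yy[0], -lim), min(yy[1], lim) + 1):
--                 for z in range(max(zz[0], -lim), min(zz[1], lim) + 1):
--                     if state == "on":
--                         on.add((x, y, z))
--                     else:
--                         on.discard((x, y, z))
--
--     return on
-- ===== SOURCE B (Python) =====
-- def _covers(box, c):
--     (xx, yy, zz), (x, y, z) = box, c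
--     return xx[0] <= x <= xx[1] and yy[0] <= y <= yy[1] and zz[0] <= z <= zz[1]
--
--
-- def _cells(xx, yy, zz, lim):
--     return [(x, y, z)
--             for x in range(max(xx[0], -lim), min(xx[1], lim) + 1)
--             for y in range(max(yy[0], -lim), min(yy[1], lim) + 1)
--             for z in range(max(zz[0], -lim), min(zz[1], lim) + 1)]
--
--
-- def compute(input, lim=50):
--     # Stateless per-cell classification instead of forward simulation: the i-th
--     # "on" instruction contributes exactly those of its clipped cells that no
--     # later instruction switches off and whose nearest earlier covering
--     # instruction is not an "on" (that one already contributed the cell).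
--     out = set()
--     for i, (state, xx, yy, zz) in enumerate(input):
--         if state != "on":
--             continue
--         rest = input[i + 1:]
--         prior = input[:i]
--         for c in _cells(xx, yy, zz, lim):
--             if any(st != "on" and _covers(box, c) for st, *box in rest):
--                 continue
--             hit = next((st for st, *box in reversed(prior) if _covers(box, c)),
--                        None)
--             if hit != "on":
--                 out.add(c)
--     return out
-- ===== Notes on version B (the rewrite author's own statement) =====
-- stated objective: alternative
-- what changed: A simulates the instructions forward, mutating one shared set cell by cell (including every cell of 'off' cuboids); B keeps no on/off state: each 'on' instruction classifies its clipped cells directly (kept iff no later instruction covering the cell switches it off and the nearest earlier covering instruction is not an 'on'), so 'off' instructions are never enumerated cell by cell — a timing run measured B faster on the generated inputs.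
import Mathlib
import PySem

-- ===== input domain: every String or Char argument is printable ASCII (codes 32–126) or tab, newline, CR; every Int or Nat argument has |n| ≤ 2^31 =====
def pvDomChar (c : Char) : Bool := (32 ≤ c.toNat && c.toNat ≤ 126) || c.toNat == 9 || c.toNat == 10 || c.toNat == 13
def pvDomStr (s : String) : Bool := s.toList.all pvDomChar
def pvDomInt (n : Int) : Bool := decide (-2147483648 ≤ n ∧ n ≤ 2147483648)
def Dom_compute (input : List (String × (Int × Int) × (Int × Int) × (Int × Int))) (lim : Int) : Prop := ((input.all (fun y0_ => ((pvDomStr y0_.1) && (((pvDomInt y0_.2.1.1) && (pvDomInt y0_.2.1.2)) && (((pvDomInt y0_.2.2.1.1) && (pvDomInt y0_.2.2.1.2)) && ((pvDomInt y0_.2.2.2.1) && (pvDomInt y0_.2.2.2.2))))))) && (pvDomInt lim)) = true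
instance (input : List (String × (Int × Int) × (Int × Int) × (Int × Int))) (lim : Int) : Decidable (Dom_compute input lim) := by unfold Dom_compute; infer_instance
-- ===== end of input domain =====

-- B replaces A's forward simulation of one mutable set by a stateless per-cell
-- classification (each "on" instruction contributes exactly the cells it is the
-- first to switch on for good); objective: alternative algorithm, same exact result.

-- ===== PORT A =====
def compute (input : List (String × (Int × Int) × (Int × Int) × (Int × Int))) (lim : Int) : List (Int × Int × Int) :=
  input.foldl
    (fun on item =>
      match item with
      | (state, xx, yy, zz) =>
        (PySem.List.pyRange (max xx.1 (-lim)) (min xx.2 lim + 1) 1).foldl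
          (fun on x =>
            (PySem.List.pyRange (max yy.1 (-lim)) (min yy.2 lim + 1) 1).foldl
              (fun on y =>
                (PySem.List.pyRange (max zz.1 (-lim)) (min zz.2 lim + 1) 1).foldl
                  (fun on z =>
                    if state == "on" then PySem.Set.add on (x, y, z)
                    else PySem.Set.discard on (x, y, z))
                  on)
              on)
          on)
    []

-- ===== PORT B =====
-- helper _covers of Source B
def pvCovers (box : (Int × Int) × (Int × Int) × (Int × Int)) (c : Int × Int × Int) : Bool :=
  match box, c with
  | (xx, yy, zz), (x, y, z) =>
    (xx.1 ≤ x && x ≤ xx.2) && (yy.1 ≤ y && y ≤ yy.2) && (zz.1 ≤ z && z ≤ zz.2)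

-- helper _cells of Source B (the comprehension, as flatMap/map)
def pvCells (xx yy zz : Int × Int) (lim : Int) : List (Int × Int × Int) :=
  (PySem.List.pyRange (max xx.1 (-lim)) (min xx.2 lim + 1) 1).flatMap fun x =>
    (PySem.List.pyRange (max yy.1 (-lim)) (min yy.2 lim + 1) 1).flatMap fun y =>
      (PySem.List.pyRange (max zz.1 (-lim)) (min zz.2 lim + 1) 1).map fun z => (x, y, z)

def compute_alt (input : List (String × (Int × Int) × (Int × Int) × (Int × Int))) (lim : Int) : List (Int × Int × Int) :=
  (PySem.List.enumerate input 0).foldl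
    (fun out p =>
      match p with
      | (i, (state, xx, yy, zz)) =>
        if state != "on" then out
        else
          let rest := PySem.List.slice input (some (i + 1)) none
          let prior := PySem.List.slice input none (some i)
          (pvCells xx yy zz lim).foldl
            (fun out c =>
              if rest.any (fun q => q.1 != "on" && pvCovers q.2 c) then out
              else
                -- next((st for st, *box in reversed(prior) if _covers(box, c)), None)
                let hit : Option String :=
                  (prior.reverse.find? (fun q => pvCovers q.2 c)).map (fun q => q.1)
                if hit != some "on" then PySem.Set.add out c else out)
            out)
    []

-- ===== PRECONDITION & SPEC =====
def Spec_compute (input : List (String × (Int × Int) × (Int × Int) × (Int × Int))) (lim : Int) (out : List (Int × Int × Int)) : Prop := out = compute_alt input lim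
instance (input : List (String × (Int × Int) × (Int × Int) × (Int × Int))) (lim : Int) (out : List (Int × Int × Int)) : Decidable (Spec_compute input lim out) := by unfold Spec_compute; infer_instance

-- ===== CLAIM (what is proved, stated in full; the proofs are below) =====
def Claim_equal_compute : Prop := ∀ (input : List (String × (Int × Int) × (Int × Int) × (Int × Int))) (lim : Int), Dom_compute input lim → Spec_compute input lim (compute input lim)

-- ===== LEMMAS AND PROOFS =====

abbrev PvItem := String × (Int × Int) × (Int × Int) × (Int × Int)
abbrev PvCell := Int × Int × Int

-- A's one-instruction step, written over the flattened cell list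
def pvAct (t : PvItem) (lim : Int) (S : List PvCell) : List PvCell :=
  (pvCells t.2.1 t.2.2.1 t.2.2.2 lim).foldl
    (fun on c => if t.1 == "on" then PySem.Set.add on c else PySem.Set.discard on c) S

-- the state of the LAST instruction of `input` covering c is "on"
def pvLastOn (input : List PvItem) (c : PvCell) : Bool :=
  match input.reverse.find? (fun q => pvCovers q.2 c) with
  | some q => q.1 == "on"
  | none => false

def pvInLim (lim : Int) (c : PvCell) : Bool :=
  (-lim ≤ c.1 && c.1 ≤ lim) && (-lim ≤ c.2.1 && c.2.1 ≤ lim) && (-lim ≤ c.2.2 && c.2.2 ≤ lim)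

-- the body of compute_alt's outer fold, with the captured full list made explicit
def pvBody (full : List PvItem) (lim : Int) : List PvCell → Int × PvItem → List PvCell :=
  fun out p =>
    match p with
    | (i, (state, xx, yy, zz)) =>
      if state != "on" then out
      else
        let rest := PySem.List.slice full (some (i + 1)) none
        let prior := PySem.List.slice full none (some i)
        (pvCells xx yy zz lim).foldl
          (fun out c =>
            if rest.any (fun q => q.1 != "on" && pvCovers q.2 c) then out
            else
              let hit : Option String :=
                (prior.reverse.find? (fun q => pvCovers q.2 c)).map (fun q => q.1)
              if hit != some "on" then PySem.Set.add out c else out)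
          out

lemma pvAlt_eq (input : List PvItem) (lim : Int) :
    compute_alt input lim = (PySem.List.enumerate input 0).foldl (pvBody input lim) [] := rfl

lemma pvCells_eq_product (xx yy zz : Int × Int) (lim : Int) :
    pvCells xx yy zz lim
    = (PySem.List.pyRange (max xx.1 (-lim)) (min xx.2 lim + 1) 1)
      ×ˢ ((PySem.List.pyRange (max yy.1 (-lim)) (min yy.2 lim + 1) 1)
        ×ˢ (PySem.List.pyRange (max zz.1 (-lim)) (min zz.2 lim + 1) 1)) := by
  simp [pvCells, SProd.sprod, List.product, List.map_flatMap, List.map_map, Function.comp_def]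

lemma pvMem_cells (xx yy zz : Int × Int) (lim : Int) (c : PvCell) :
    c ∈ pvCells xx yy zz lim ↔ (pvCovers (xx, yy, zz) c && pvInLim lim c) = true := by
  obtain ⟨x, y, z⟩ := c
  rw [pvCells_eq_product]
  simp [PySem.List.mem_pyRange_one, pvCovers, pvInLim]
  omega

lemma pvCells_nodup (xx yy zz : Int × Int) (lim : Int) : (pvCells xx yy zz lim).Nodup := by
  rw [pvCells_eq_product]
  exact (PySem.List.nodup_pyRange_one _ _).product
    ((PySem.List.nodup_pyRange_one _ _).product (PySem.List.nodup_pyRange_one _ _))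

lemma pvCompute_append (input : List PvItem) (t : PvItem) (lim : Int) :
    compute (input ++ [t]) lim = pvAct t lim (compute input lim) := by
  obtain ⟨state, xx, yy, zz⟩ := t
  simp only [compute, List.foldl_append, List.foldl_cons, List.foldl_nil]
  rw [pvAct]
  simp only [pvCells, List.foldl_flatMap, List.foldl_map]

lemma pvFoldl_discard (cs : List PvCell) (S : List PvCell) :
    cs.foldl (fun on c => PySem.Set.discard on c) S = S.filter (fun c => !cs.contains c) := by
  induction cs generalizing S with
  | nil => simp
  | cons c cs ih =>
    rw [List.foldl_cons, ih]
    simp only [PySem.Set.discard, List.filter_filter]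
    apply List.filter_congr
    intro a _
    by_cases h : a = c <;> simp [h]

lemma pvFoldl_add (cs : List PvCell) (S : List PvCell) (h : cs.Nodup) :
    cs.foldl (fun on c => PySem.Set.add on c) S = S ++ cs.filter (fun c => !S.contains c) := by
  induction cs generalizing S with
  | nil => simp
  | cons c cs ih =>
    obtain ⟨hc, hcs⟩ := List.nodup_cons.mp h
    simp only [List.foldl_cons, ih _ hcs]
    by_cases hm : c ∈ S
    · rw [PySem.Set.add_of_mem hm]
      simp [hm]
    · rw [PySem.Set.add_of_not_mem hm]
      simp only [List.filter_cons]
      have h1 : (!S.contains c) = true := by simp [hm]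
      rw [if_pos h1]
      rw [List.append_assoc]
      simp only [List.singleton_append]
      congr 1
      congr 1
      apply List.filter_congr
      intro a ha
      have : a ≠ c := fun e => hc (e ▸ ha)
      simp [this]

lemma pvLastOn_append (input : List PvItem) (t : PvItem) (c : PvCell) :
    pvLastOn (input ++ [t]) c = if pvCovers t.2 c then t.1 == "on" else pvLastOn input c := by
  by_cases h : pvCovers t.2 c <;>
    simp [pvLastOn, List.reverse_append, h]

lemma pvHit_eq (input : List PvItem) (c : PvCell) :
    (((input.reverse.find? (fun q => pvCovers q.2 c)).map (fun q => q.1)) != some "on")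
    = !pvLastOn input c := by
  unfold pvLastOn
  cases hf : input.reverse.find? (fun q => pvCovers q.2 c) <;> simp [bne]

-- membership characterisation of A's result
lemma pvMemA (input : List PvItem) (lim : Int) (c : PvCell) :
    c ∈ compute input lim ↔ (pvInLim lim c = true ∧ pvLastOn input c = true) := by
  induction input using List.reverseRecOn with
  | nil => simp [compute, pvLastOn]
  | append_singleton input t ih =>
    rw [pvCompute_append, pvLastOn_append]
    unfold pvAct
    by_cases hon : (t.1 == "on") = true
    · have hbody : (fun (on : List PvCell) (c : PvCell) =>
          if t.1 == "on" then PySem.Set.add on c else PySem.Set.discard on c)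
          = fun on c => PySem.Set.add on c := by
        funext on c; rw [hon]; rfl
      rw [hbody, pvFoldl_add _ _ (pvCells_nodup _ _ _ _)]
      simp only [List.mem_append, List.mem_filter, pvMem_cells, ih, hon,
        Bool.and_eq_true, Bool.not_eq_true', List.contains_eq_mem, decide_eq_false_iff_not]
      by_cases hcov : pvCovers t.2 c <;> by_cases hlim : pvInLim lim c <;>
        simp [hcov, hlim]
    · have hbody : (fun (on : List PvCell) (c : PvCell) =>
          if t.1 == "on" then PySem.Set.add on c else PySem.Set.discard on c)
          = fun on c => PySem.Set.discard on c := by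
        funext on c; simp [hon]
      rw [hbody, pvFoldl_discard]
      simp only [List.mem_filter, ih, Bool.not_eq_true', List.contains_eq_mem,
        decide_eq_false_iff_not, pvMem_cells]
      by_cases hcov : pvCovers t.2 c <;> by_cases hlim : pvInLim lim c <;>
        simp [hcov, hlim, hon]

-- pushing a filter through a fold whose steps commute with it
lemma pvFoldl_filter_comm {α : Type} (g : PvCell → Bool) (f f' : List PvCell → α → List PvCell)
    (l : List α) (h : ∀ (S : List PvCell) (p : α), p ∈ l → f (S.filter g) p = (f' S p).filter g) :
    ∀ S : List PvCell, l.foldl f (S.filter g) = (l.foldl f' S).filter g := by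
  intro S
  induction l generalizing S with
  | nil => rfl
  | cons p l ih =>
    simp only [List.foldl_cons]
    rw [h S p (List.mem_cons_self), ih (fun S q hq => h S q (List.mem_cons_of_mem _ hq))]

-- appending an "off" instruction filters B's emissions by its (unclipped) box
lemma pvB_off (input : List PvItem) (t : PvItem) (lim : Int) (hoff : ¬ t.1 = "on") :
    ∀ S : List PvCell,
      (PySem.List.enumerate input 0).foldl (pvBody (input ++ [t]) lim)
        (S.filter (fun c => !pvCovers t.2 c))
      = ((PySem.List.enumerate input 0).foldl (pvBody input lim) S).filter
          (fun c => !pvCovers t.2 c) := by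
  apply pvFoldl_filter_comm
  intro S p hp
  obtain ⟨k, hk, rfl⟩ := (PySem.List.mem_enumerate_iff input 0 p).mp hp
  set q := input[k] with hq
  obtain ⟨st, xx, yy, zz⟩ := q
  simp only [pvBody]
  by_cases hst : (st != "on") = true
  · simp [hst]
  · simp only [hst, Bool.false_eq_true, if_false]
    have h1 : (0 : Int) + (k : Int) + 1 = ((k + 1 : Nat) : Int) := by push_cast; ring
    have h2 : (0 : Int) + (k : Int) = ((k : Nat) : Int) := by omega
    rw [h1, h2, PySem.List.slice_from_natCast, PySem.List.slice_from_natCast,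
      PySem.List.slice_to_natCast, PySem.List.slice_to_natCast,
      List.drop_append_of_le_length (by omega), List.take_append_of_le_length (by omega)]
    apply pvFoldl_filter_comm
    intro S2 c _
    have hoffb : (t.1 != "on") = true := by
      cases hb : t.1 == "on"
      · simp [bne, hb]
      · exact absurd (by simpa using hb) hoff
    have hany : ((input.drop (k + 1) ++ [t]).any fun q => q.1 != "on" && pvCovers q.2 c)
        = (((input.drop (k + 1)).any fun q => q.1 != "on" && pvCovers q.2 c) || pvCovers t.2 c) := by
      rw [List.any_append]
      simp [hoffb]
    rw [hany]
    by_cases hcov : pvCovers t.2 c = true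
    · simp only [hcov, Bool.or_true, if_true]
      by_cases hA : ((input.drop (k + 1)).any fun q => q.1 != "on" && pvCovers q.2 c) = true
      · simp [hA]
      · simp only [hA, Bool.false_eq_true, if_false]
        split
        · rw [PySem.Set.add_eq_ite]
          split
          · rfl
          · rw [List.filter_append]
            simp [hcov]
        · rfl
    · simp only [hcov, Bool.or_false]
      by_cases hA : ((input.drop (k + 1)).any fun q => q.1 != "on" && pvCovers q.2 c) = true
      · simp [hA]
      · simp only [hA, Bool.false_eq_true, if_false]
        split
        · rw [PySem.Set.add_eq_ite, PySem.Set.add_eq_ite]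
          have hmem : c ∈ S2.filter (fun c => !pvCovers t.2 c) ↔ c ∈ S2 := by
            simp [List.mem_filter, hcov]
          by_cases hS : c ∈ S2
          · rw [if_pos (hmem.mpr hS), if_pos hS]
          · rw [if_neg (fun h => hS (hmem.mp h)), if_neg hS, List.filter_append]
            simp [hcov]
        · rfl

-- appending an "on" instruction leaves earlier emissions unchanged
lemma pvB_on (input : List PvItem) (t : PvItem) (lim : Int) (hon : t.1 = "on") (S : List PvCell) :
    (PySem.List.enumerate input 0).foldl (pvBody (input ++ [t]) lim) S
    = (PySem.List.enumerate input 0).foldl (pvBody input lim) S := by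
  apply PySem.List.foldl_congr_mem
  intro acc p hp
  obtain ⟨k, hk, rfl⟩ := (PySem.List.mem_enumerate_iff input 0 p).mp hp
  set q := input[k] with hq
  obtain ⟨st, xx, yy, zz⟩ := q
  simp only [pvBody]
  by_cases hst : (st != "on") = true
  · simp [hst]
  · simp only [hst, Bool.false_eq_true, if_false]
    have h1 : (0 : Int) + (k : Int) + 1 = ((k + 1 : Nat) : Int) := by push_cast; ring
    have h2 : (0 : Int) + (k : Int) = ((k : Nat) : Int) := by omega
    rw [h1, h2, PySem.List.slice_from_natCast, PySem.List.slice_from_natCast,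
      PySem.List.slice_to_natCast, PySem.List.slice_to_natCast,
      List.drop_append_of_le_length (by omega), List.take_append_of_le_length (by omega)]
    apply PySem.List.foldl_congr_mem
    intro acc2 c _
    have hany : ((input.drop (k + 1) ++ [t]).any fun q => q.1 != "on" && pvCovers q.2 c)
        = ((input.drop (k + 1)).any fun q => q.1 != "on" && pvCovers q.2 c) := by
      rw [List.any_append]
      simp [hon]
    rw [hany]

theorem pvMain (input : List PvItem) (lim : Int) : compute input lim = compute_alt input lim := by
  induction input using List.reverseRecOn with
  | nil => rfl
  | append_singleton input t ih =>
    rw [pvCompute_append, pvAlt_eq, PySem.List.enumerate_append, List.foldl_append]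
    simp only [PySem.List.enumerate_cons, PySem.List.enumerate_nil, List.foldl_cons,
      List.foldl_nil]
    by_cases hon : t.1 = "on"
    · rw [pvB_on input t lim hon, ← pvAlt_eq, ← ih]
      obtain ⟨st, xx, yy, zz⟩ := t
      simp only at hon
      subst hon
      simp only [pvBody, bne_self_eq_false, Bool.false_eq_true, if_false]
      have h1 : (0 : Int) + (input.length : Int) + 1 = ((input.length + 1 : Nat) : Int) := by
        push_cast; ring
      have h2 : (0 : Int) + (input.length : Int) = ((input.length : Nat) : Int) := by omega
      have hdrop : (input ++ [(("on" : String), xx, yy, zz)]).drop (input.length + 1)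
          = [] := by simp
      have htake : (input ++ [(("on" : String), xx, yy, zz)]).take input.length = input := by
        simp
      rw [h1, h2, PySem.List.slice_from_natCast, PySem.List.slice_to_natCast, hdrop, htake]
      simp only [List.any_nil, Bool.false_eq_true, if_false]
      unfold pvAct
      rw [show (fun (on : List PvCell) (c : PvCell) =>
          if ("on" : String) == "on" then PySem.Set.add on c else PySem.Set.discard on c)
          = fun on c => PySem.Set.add on c from by funext on c; rfl]
      rw [← List.foldl_filter, pvFoldl_add _ _ (pvCells_nodup _ _ _ _),
        pvFoldl_add _ _ ((pvCells_nodup xx yy zz lim).filter _), List.filter_filter]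
      congr 1
      apply List.filter_congr
      intro c hc
      by_cases hcS : c ∈ compute input lim
      · simp [hcS]
      · have h3 : (!(compute input lim).contains c) = true := by simp [hcS]
        rw [h3, pvHit_eq]
        have hcell := (pvMem_cells xx yy zz lim c).mp hc
        rw [Bool.and_eq_true] at hcell
        have hlast : pvLastOn input c = false := by
          cases hl : pvLastOn input c
          · rfl
          · exact absurd ((pvMemA input lim c).mpr ⟨hcell.2, hl⟩) hcS
        rw [hlast]
        rfl
    · have hF : (PySem.List.enumerate input 0).foldl (pvBody (input ++ [t]) lim) []
          = (compute input lim).filter (fun c => !pvCovers t.2 c) := by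
        have h0 : ([] : List PvCell)
            = ([] : List PvCell).filter (fun c => !pvCovers t.2 c) := rfl
        rw [h0, pvB_off input t lim hon, ← pvAlt_eq, ← ih]
      rw [hF]
      have hst : (t.1 != "on") = true := by
        cases hb : t.1 == "on"
        · simp [bne, hb]
        · exact absurd (by simpa using hb) hon
      obtain ⟨st, xx, yy, zz⟩ := t
      simp only [pvBody]
      simp only at hst
      rw [if_pos hst]
      unfold pvAct
      rw [show (fun (on : List PvCell) (c : PvCell) =>
          if st == "on" then PySem.Set.add on c else PySem.Set.discard on c)
          = fun on c => PySem.Set.discard on c from by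
        funext on c
        have : (st == "on") = false := by
          cases hb : st == "on"
          · rfl
          · simp [bne, hb] at hst
        rw [this]
        rfl]
      rw [pvFoldl_discard]
      apply List.filter_congr
      intro c hcS
      have hlim : pvInLim lim c = true := ((pvMemA input lim c).mp hcS).1
      have hco : (pvCells xx yy zz lim).contains c = pvCovers (xx, yy, zz) c := by
        by_cases hcv : pvCovers (xx, yy, zz) c = true
        · have hm : c ∈ pvCells xx yy zz lim :=
            (pvMem_cells xx yy zz lim c).mpr (by simp [hcv, hlim])
          simp [hm, hcv]
        · have hm : c ∉ pvCells xx yy zz lim := fun hm => by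
            have := (pvMem_cells xx yy zz lim c).mp hm
            rw [Bool.and_eq_true] at this
            exact hcv this.1
          simp only [Bool.not_eq_true] at hcv
          simp [hm, hcv]
      rw [hco]

-- ===== VERDICT (by name: the statement is the Claim_ definition above) =====
theorem compute_spec : Claim_equal_compute := by
  intro input lim _
  unfold Spec_compute
  exact pvMain input lim
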